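-- pv_equiv track=rewrite | github.com/donghyun-98/Code-Kata-SQL-Python- | 프로그래머스/2/84512. 모음 사전/모음 사전.py | solution
-- ===== SOURCE A (Python) =====
-- def solution(word):
--     vowels = ['A', 'E', 'I', 'O', 'U']
--
--     # 자리별로 가능한 경우의 수 계산을 위한 리스트
--     place_value = [781, 156, 31, 6, 1]  # 5자리 이하 단어들의 경우의 수 (5^4, 5^3, 5^2, 5^1, 5^0)
--
--     # 각 자리별로 가능한 경우의 수를 계산하며 위치를 구하기
--     answer = 0
--     for i, char in enumerate(word):
--         index = vowels.index(char)  # 현재 글자가 사전에서 몇 번째인지 찾고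
--         answer += index * place_value[i] + 1  # 현재 글자가 차지하는 단어 순서를 더하기
--
--     return answer
-- ===== SOURCE B (Python) =====
-- def solution(word):
--     words = []
--
--     def dfs(cur):
--         for v in "AEIOU":
--             w = cur + v
--             words.append(w)
--             if len(w) < 5:
--                 dfs(w)
--
--     dfs("")
--     return words.index(word) + 1
-- ===== Notes on version B (the rewrite author's own statement) =====
-- stated objective: alternative
-- what changed: B replaces A's closed-form positional rank (index*place_value sums) by DFS-generating the full 3905-word vowel dictionary in lexicographic order and returning words.index(word)+1.
-- outside the precondition, e.g. on solution(''): A returns 0, B raises ValueError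
import Mathlib
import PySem

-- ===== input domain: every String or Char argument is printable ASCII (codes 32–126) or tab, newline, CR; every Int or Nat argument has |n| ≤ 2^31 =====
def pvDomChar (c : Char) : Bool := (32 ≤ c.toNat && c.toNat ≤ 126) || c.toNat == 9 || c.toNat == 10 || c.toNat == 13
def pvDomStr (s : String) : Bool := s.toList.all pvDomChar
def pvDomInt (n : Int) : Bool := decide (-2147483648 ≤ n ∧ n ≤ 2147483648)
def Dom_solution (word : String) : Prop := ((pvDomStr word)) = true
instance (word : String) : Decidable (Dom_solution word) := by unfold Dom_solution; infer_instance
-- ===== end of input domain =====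

-- B generates the whole vowel dictionary by DFS in lexicographic order and looks the word up,
-- instead of A's closed-form positional rank; same value on every valid 1..5-letter vowel word.

-- ===== PORT A =====
def vowelsA : List Char := ['A', 'E', 'I', 'O', 'U']

def placeValue : List Int := [781, 156, 31, 6, 1]

-- the for-loop of A; none = a raise (vowels.index ValueError or place_value[i] IndexError)
def solutionGo : List (Int × Char) → Int → Option Int
  | [], answer => some answer
  | (i, c) :: rest, answer =>
    match PySem.List.index? vowelsA c, PySem.List.pyGet? placeValue i with
    | some index, some pv => solutionGo rest (answer + (index : Int) * pv + 1)
    | _, _ => none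

def solution (word : String) : Int :=
  (solutionGo (PySem.List.enumerate word.toList 0) 0).getD 0

-- ===== PORT B =====
-- dfs(cur): for v in "AEIOU": w = cur+v; words.append(w); if len(w) < 5: dfs(w)
-- (fuel is only a totality guard; the Python guard 'len(w) < 5' is kept verbatim)
def dfsB (cur : List Char) : Nat → List (List Char)
  | 0 => []
  | fuel + 1 =>
    ['A', 'E', 'I', 'O', 'U'].flatMap (fun v =>
      let w := cur ++ [v]
      w :: (if w.length < 5 then dfsB w fuel else []))

def solution_alt (word : String) : Int :=
  ((PySem.List.index? (dfsB [] 5) word.toList).map (fun i => (i : Int) + 1)).getD 0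

-- ===== PRECONDITION & SPEC =====
-- Pre_ excludes: non-vowel characters (A raises ValueError) and words longer than 5 (A raises
-- IndexError); and the empty word, on which A returns 0 while B raises ValueError ("" is not in
-- the dictionary) — a value B cannot and should not match.
def Pre_solution (word : String) : Prop :=
  word.toList ≠ [] ∧ word.toList.length ≤ 5 ∧ word.toList.all (· ∈ vowelsA) = true
instance (word : String) : Decidable (Pre_solution word) := by unfold Pre_solution; infer_instance

def pvWitness_solution : String := "EIO"

def Spec_solution (word : String) (out : Int) : Prop := out = solution_alt word
instance (word : String) (out : Int) : Decidable (Spec_solution word out) := by unfold Spec_solution; infer_instance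

-- ===== CLAIM (what is proved, stated in full; the proofs are below) =====
def Claim_equal_solution : Prop := ∀ (word : String), Dom_solution word → Pre_solution word → Spec_solution word (solution word)

-- ===== LEMMAS AND PROOFS =====

-- the dictionary of nonempty vowel suffix-words of length ≤ k, in DFS (lexicographic) order
def Tdict : Nat → List (List Char)
  | 0 => []
  | k + 1 => vowelsA.flatMap (fun v => [v] :: (Tdict k).map (v :: ·))

-- the rank (0-based index in Tdict k) of a vowel word
def rk : List Char → Nat → Nat
  | [], _ => 0
  | _ :: _, 0 => 0
  | c :: rest, k + 1 =>
    vowelsA.idxOf c * (1 + (Tdict k).length) +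
      (match rest with | [] => 0 | _ :: _ => 1 + rk rest k)

theorem Tdict_len_succ (k : Nat) : (Tdict (k + 1)).length = 5 * (Tdict k).length + 5 := by
  simp [Tdict, vowelsA]; ring

theorem dfsB_eq (fuel : Nat) : ∀ cur : List Char, cur.length + fuel = 5 →
    dfsB cur fuel = (Tdict fuel).map (cur ++ ·) := by
  induction fuel with
  | zero => intro cur h; simp [dfsB, Tdict]
  | succ fuel ih =>
    intro cur h
    have hb : ∀ v : Char, (if (cur ++ [v]).length < 5 then dfsB (cur ++ [v]) fuel else [])
        = (Tdict fuel).map ((cur ++ [v]) ++ ·) := by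
      intro v
      by_cases hlt : (cur ++ [v]).length < 5
      · rw [if_pos hlt, ih (cur ++ [v]) (by simp at hlt ⊢; omega)]
      · have hf0 : fuel = 0 := by simp at hlt; omega
        rw [if_neg hlt, hf0]; simp [Tdict]
    show List.flatMap _ _ = _
    simp only [Tdict, List.map_flatMap]
    refine List.flatMap_congr (fun v _ => ?_)
    simp only [hb, List.map_cons, List.map_map]
    congr 1
    refine List.map_congr_left (fun t _ => ?_)
    simp

theorem not_mem_block {v c : Char} (M : List (List Char)) (rest : List Char) (h : v ≠ c) :
    (c :: rest) ∉ ([v] :: M.map (v :: ·)) := by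
  intro hmem
  rcases List.mem_cons.mp hmem with h1 | h2
  · exact h (by injection h1 with h1' _; exact h1'.symm)
  · obtain ⟨t, -, ht⟩ := List.mem_map.mp h2
    exact h (List.cons.inj ht).1

theorem index?_map_cons (v : Char) (rest : List Char) : ∀ M : List (List Char),
    PySem.List.index? (M.map (v :: ·)) (v :: rest) = PySem.List.index? M rest := by
  intro M
  induction M with
  | nil => simp [PySem.List.index?_eq_idxOf?, List.idxOf?]
  | cons t M ih =>
    by_cases h : t = rest
    · subst h
      simp only [List.map_cons]
      rw [PySem.List.index?_cons_self, PySem.List.index?_cons_self]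
    · simp only [List.map_cons]
      rw [PySem.List.index?_cons_of_ne _ (by simp [h]), PySem.List.index?_cons_of_ne _ h, ih]

theorem index?_append_of_not_mem {α : Type} [BEq α] [LawfulBEq α] {v : α} :
    ∀ (l t : List α), v ∉ l →
    PySem.List.index? (l ++ t) v = (PySem.List.index? t v).map (· + l.length) := by
  intro l t hv
  induction l with
  | nil => simp
  | cons x l ih =>
    have hx : x ≠ v := fun h => hv (h ▸ List.mem_cons_self)
    rw [List.cons_append, PySem.List.index?_cons_of_ne _ hx,
      ih (fun h => hv (List.mem_cons_of_mem _ h))]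
    cases PySem.List.index? t v <;> simp; omega

-- rank of a vowel word inside one flatMap layer
theorem index?_layer (M : List (List Char)) (c : Char) (rest : List Char) (i : Nat)
    (hinner : PySem.List.index? ([c] :: M.map (c :: ·)) (c :: rest) = some i) :
    ∀ vs : List Char, c ∈ vs → vs.Nodup →
    PySem.List.index? (vs.flatMap (fun v => [v] :: M.map (v :: ·))) (c :: rest)
      = some (vs.idxOf c * (1 + M.length) + i) := by
  intro vs
  induction vs with
  | nil => intro h; exact absurd h (List.not_mem_nil)
  | cons v vs ih =>
    intro hmem hnd
    rw [List.flatMap_cons]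
    by_cases hvc : v = c
    · subst hvc
      have hm : (v :: rest) ∈ ([v] :: M.map (v :: ·)) :=
        (PySem.List.index?_isSome_iff _ _).mp (by rw [hinner]; rfl)
      rw [PySem.List.index?_append_of_mem _ hm, hinner, List.idxOf_cons_self]
      simp
    · have hnm := not_mem_block M rest hvc
      rw [index?_append_of_not_mem _ _ hnm,
        ih (List.mem_of_ne_of_mem (fun h => hvc h.symm) hmem) hnd.of_cons]
      have : (v :: vs).idxOf c = vs.idxOf c + 1 := by
        simp [hvc]
      rw [this]
      simp [List.length_map]
      ring

theorem vowels_nodup : vowelsA.Nodup := by decide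

theorem index?_Tdict : ∀ (w : List Char) (k : Nat), w ≠ [] → w.length ≤ k →
    (∀ c ∈ w, c ∈ vowelsA) →
    PySem.List.index? (Tdict k) w = some (rk w k) := by
  intro w
  induction w with
  | nil => intro k h; exact absurd rfl h
  | cons c rest ih =>
    intro k _ hlen hv
    match k, hlen with
    | k + 1, hlen =>
      have hc : c ∈ vowelsA := hv c List.mem_cons_self
      have hT : Tdict (k + 1) = vowelsA.flatMap (fun v => [v] :: (Tdict k).map (v :: ·)) := rfl
      match rest with
      | [] =>
        have hinner : PySem.List.index? ([c] :: (Tdict k).map (c :: ·)) [c] = some 0 :=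
          PySem.List.index?_cons_self _ _
        rw [hT, index?_layer (Tdict k) c [] 0 hinner vowelsA hc vowels_nodup]
        simp [rk]
      | r :: rest' =>
        have hinner : PySem.List.index? ([c] :: (Tdict k).map (c :: ·)) (c :: r :: rest')
            = some (1 + rk (r :: rest') k) := by
          rw [PySem.List.index?_cons_of_ne _ (by simp),
            index?_map_cons, ih k (by simp) (by simp at hlen ⊢; omega)
              (fun x hx => hv x (List.mem_cons_of_mem _ hx))]
          simp [Nat.add_comm]
        rw [hT, index?_layer (Tdict k) c (r :: rest') _ hinner vowelsA hc vowels_nodup]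
        rfl

theorem index?_vowels_of_mem {c : Char} (h : c ∈ vowelsA) :
    PySem.List.index? vowelsA c = some (vowelsA.idxOf c) := by
  simp only [vowelsA, List.mem_cons, List.not_mem_nil, or_false] at h
  rcases h with rfl | rfl | rfl | rfl | rfl <;> decide

theorem Tlen0 : (Tdict 0).length = 0 := rfl
theorem Tlen1 : (Tdict 1).length = 5 := by rw [Tdict_len_succ, Tlen0]
theorem Tlen2 : (Tdict 2).length = 30 := by rw [Tdict_len_succ, Tlen1]
theorem Tlen3 : (Tdict 3).length = 155 := by rw [Tdict_len_succ, Tlen2]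
theorem Tlen4 : (Tdict 4).length = 780 := by rw [Tdict_len_succ, Tlen3]

theorem placeValue_get (k : Nat) (hk : k ≤ 4) :
    PySem.List.pyGet? placeValue (4 - (k : Int)) = some (1 + ((Tdict k).length : Int)) := by
  interval_cases k <;>
    simp [Tlen0, Tlen1, Tlen2, Tlen3, Tlen4, placeValue, PySem.List.pyGet?, PySem.List.pyIdx?]

theorem solutionGo_eq : ∀ (w : List Char) (k : Nat) (answer : Int), w ≠ [] →
    w.length ≤ k → k ≤ 5 → (∀ c ∈ w, c ∈ vowelsA) →
    solutionGo (PySem.List.enumerate w (5 - (k : Int))) answer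
      = some (answer + (rk w k : Int) + 1) := by
  intro w
  induction w with
  | nil => intro k a h; exact absurd rfl h
  | cons c rest ih =>
    intro k answer _ hlen hk5 hv
    match k, hlen with
    | k + 1, hlen =>
      have hc : c ∈ vowelsA := hv c List.mem_cons_self
      rw [PySem.List.enumerate_cons]
      show solutionGo _ _ = _
      push_cast
      rw [show (5 - ((k : Int) + 1)) = (4 - (k : Int)) by ring]
      simp only [solutionGo, index?_vowels_of_mem hc,
        placeValue_get k (by omega)]
      match rest with
      | [] =>
        simp only [PySem.List.enumerate_nil, solutionGo, rk]
        congr 1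
      | r :: rest' =>
        rw [show (4 - (k : Int) + 1) = 5 - (k : Int) by ring,
          ih k _ (by simp) (by simp at hlen ⊢; omega) (by omega)
            (fun x hx => hv x (List.mem_cons_of_mem _ hx))]
        congr 1
        show _ = _ + ((rk (c :: r :: rest') (k + 1) : Nat) : Int) + 1
        rw [show rk (c :: r :: rest') (k + 1)
            = vowelsA.idxOf c * (1 + (Tdict k).length) + (1 + rk (r :: rest') k) from rfl]
        push_cast
        ring

-- ===== VERDICT (by name: the statement is the Claim_ definition above) =====
theorem solution_spec : Claim_equal_solution := by
  intro word _ hpre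
  obtain ⟨hne, hlen, hva⟩ := hpre
  have hv : ∀ c ∈ word.toList, c ∈ vowelsA := by simpa using hva
  show solution word = solution_alt word
  have hA := solutionGo_eq word.toList 5 0 hne hlen (by norm_num) hv
  norm_num at hA
  unfold solution solution_alt
  rw [hA, show dfsB [] 5 = Tdict 5 by rw [dfsB_eq 5 [] (by simp)]; simp,
    index?_Tdict word.toList 5 hne hlen hv]
  simp
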